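-- pv_equiv track=rewrite | github.com/HuanWangGATECH/leetcode | leetcode_1st/8.24.lc500.py | sameRow
-- ===== SOURCE A (Python) =====
-- def sameRow(word):
--     dictString={}
--
--     for s in "qwertyuiop":
--
--         dictString[s]=1
--
--     for s in "asdfghjkl":
--         dictString[s]=2
--
--     for s in "zxcvbnm":
--         dictString[s]=3
--     prev=0
--     for s in word:
--         character=s.lower()
--         if prev==0:
--             prev=dictString[character]
--
--         if dictString[character]!=prev:
--             return False
--
--
--         prev=dictString[character]
--
--     return True
-- ===== SOURCE B (Python) =====
-- def sameRow(word):
--     return any(all(c.lower() in row for c in word)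
--                for row in ("qwertyuiop", "asdfghjkl", "zxcvbnm"))
-- ===== Notes on version B (the rewrite author's own statement) =====
-- stated objective: simpler
-- what changed: Dropped the letter-to-row-number dictionary and the stateful early-exit loop comparing each letter's row to a running prev; B instead tests, per keyboard row, whether every character of the word belongs to that row string, succeeding if any row contains the whole word; Pre_ excludes exactly the words on which A raises KeyError (maximal letter prefix all in one row, followed by a non-letter).
import Mathlib
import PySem

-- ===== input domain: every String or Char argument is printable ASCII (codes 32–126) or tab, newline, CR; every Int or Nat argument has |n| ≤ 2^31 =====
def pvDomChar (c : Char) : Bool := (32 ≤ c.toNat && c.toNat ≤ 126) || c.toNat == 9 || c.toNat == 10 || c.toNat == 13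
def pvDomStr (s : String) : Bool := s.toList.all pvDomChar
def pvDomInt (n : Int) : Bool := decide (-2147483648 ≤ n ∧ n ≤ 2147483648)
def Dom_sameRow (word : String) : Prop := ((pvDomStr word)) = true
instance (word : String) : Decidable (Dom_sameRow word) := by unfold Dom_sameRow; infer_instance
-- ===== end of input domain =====

-- B drops A's letter→row dictionary and stateful early-exit loop: it tests, per keyboard row
-- string, whether every character of the word lies in that row (objective: simpler).

-- ===== PORT A =====
-- the three dict-building loops of A
def sameRowDict : PySem.Dict Char Int :=
  let d := "qwertyuiop".toList.foldl (fun d s => d.insert s 1) PySem.Dict.empty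
  let d := "asdfghjkl".toList.foldl (fun d s => d.insert s 2) d
  "zxcvbnm".toList.foldl (fun d s => d.insert s 3) d

-- A's loop; `dictString[character]` is `(d.get? character).getD 0`: the `getD 0` stands for
-- Python's KeyError, which Pre_sameRow excludes (only letter characters are admitted).
def sameRowLoop (d : PySem.Dict Char Int) (prev : Int) : List Char → Bool
  | [] => true
  | s :: rest =>
    let character := PySem.Chars.lowerChar s
    let prev1 := if prev == 0 then (d.get? character).getD 0 else prev
    if (d.get? character).getD 0 != prev1 then false
    else sameRowLoop d ((d.get? character).getD 0) rest

def sameRow (word : String) : Bool :=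
  sameRowLoop sameRowDict 0 word.toList

-- ===== PORT B =====
-- any(all(c.lower() in row for c in word) for row in ("qwertyuiop","asdfghjkl","zxcvbnm"))
def sameRow_alt (word : String) : Bool :=
  ["qwertyuiop", "asdfghjkl", "zxcvbnm"].any (fun row =>
    word.toList.all (fun c => row.toList.contains (PySem.Chars.lowerChar c)))

-- ===== PRECONDITION & SPEC =====
def pvLetters : List Char :=
  "qwertyuiopasdfghjklzxcvbnmQWERTYUIOPASDFGHJKLZXCVBNM".toList

-- standalone letter→row map used only to state Pre_ (not either port's code)
def pvRowOf (c : Char) : Int :=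
  if "qwertyuiop".toList.contains (PySem.Chars.lowerChar c) then 1
  else if "asdfghjkl".toList.contains (PySem.Chars.lowerChar c) then 2
  else if "zxcvbnm".toList.contains (PySem.Chars.lowerChar c) then 3
  else 0

-- Pre_ excludes exactly the words on which A raises KeyError: those whose maximal letter prefix
-- is all in one keyboard row and is followed by a non-letter character (A's dict lookup fails
-- there before any early False exit; B returns False on those words).
def Pre_sameRow (word : String) : Prop :=
  word.toList.all (fun c => pvLetters.contains c) = true ∨
  ((word.toList.takeWhile (fun c => pvLetters.contains c)).all
     (fun c => pvRowOf c ==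
       pvRowOf ((word.toList.takeWhile (fun c => pvLetters.contains c)).headD 'a')) = false)
instance (word : String) : Decidable (Pre_sameRow word) := by unfold Pre_sameRow; infer_instance

def pvWitness_sameRow : String := "Dad"

def Spec_sameRow (word : String) (out : Bool) : Prop := out = sameRow_alt word
instance (word : String) (out : Bool) : Decidable (Spec_sameRow word out) := by unfold Spec_sameRow; infer_instance

-- ===== CLAIM (what is proved, stated in full; the proofs are below) =====
def Claim_equal_sameRow : Prop :=
  ∀ (word : String), Dom_sameRow word → Pre_sameRow word → Spec_sameRow word (sameRow word)

-- ===== LEMMAS AND PROOFS =====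

def pvRow (c : Char) : Int := (sameRowDict.get? (PySem.Chars.lowerChar c)).getD 0

-- per-letter facts: row membership matches the dict's row number, and the row is one of 1,2,3
set_option maxRecDepth 10000 in
lemma rows_tab : pvLetters.all (fun c =>
    ("qwertyuiop".toList.contains (PySem.Chars.lowerChar c) == (pvRow c == 1)) &&
    ("asdfghjkl".toList.contains (PySem.Chars.lowerChar c) == (pvRow c == 2)) &&
    ("zxcvbnm".toList.contains (PySem.Chars.lowerChar c) == (pvRow c == 3)) &&
    ((pvRow c == 1) || (pvRow c == 2) || (pvRow c == 3)) &&
    (pvRowOf c == pvRow c)) = true := by decide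

lemma tab_of_letter (c : Char) (h : pvLetters.contains c = true) :
    ("qwertyuiop".toList.contains (PySem.Chars.lowerChar c) = (pvRow c == 1)) ∧
    ("asdfghjkl".toList.contains (PySem.Chars.lowerChar c) = (pvRow c == 2)) ∧
    ("zxcvbnm".toList.contains (PySem.Chars.lowerChar c) = (pvRow c == 3)) ∧
    (pvRow c = 1 ∨ pvRow c = 2 ∨ pvRow c = 3) ∧ pvRowOf c = pvRow c := by
  have hall := rows_tab
  rw [List.all_eq_true] at hall
  have hc := hall c (by simpa using h)
  simp only [Bool.and_eq_true, beq_iff_eq, Bool.or_eq_true] at hc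
  obtain ⟨⟨⟨⟨h1, h2⟩, h3⟩, h4⟩, h5⟩ := hc
  refine ⟨by simpa using h1, by simpa using h2, by simpa using h3, ?_, by simpa using h5⟩
  rcases h4 with (h | h) | h
  exacts [Or.inl h, Or.inr (Or.inl h), Or.inr (Or.inr h)]

-- A's first iteration just records the head's row
lemma loop_step (c : Char) (cs : List Char) :
    sameRowLoop sameRowDict 0 (c :: cs) = sameRowLoop sameRowDict (pvRow c) cs := by
  rw [sameRowLoop]
  simp [pvRow]

-- A's loop with a nonzero prev is an all-rows-equal check
lemma loop_of_ne (r : Int) (hr : r ≠ 0) (cs : List Char) :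
    sameRowLoop sameRowDict r cs = cs.all (fun c => pvRow c == r) := by
  induction cs generalizing r with
  | nil => rfl
  | cons c cs ih =>
    rw [sameRowLoop, List.all_cons]
    by_cases h0 : (sameRowDict.get? (PySem.Chars.lowerChar c)).getD 0 = r
    · simp only [pvRow, h0, beq_self_eq_true, ih r hr]
      simp [hr]
    · simp only [pvRow]
      simp [hr, h0]

-- under the letters precondition, membership in row k is pvRow = k, listwise
lemma all_row_congr (k : Int) (row : List Char)
    (hrow : ∀ c, pvLetters.contains c = true →
       row.contains (PySem.Chars.lowerChar c) = (pvRow c == k))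
    (cs : List Char) (hcs : cs.all (fun c => pvLetters.contains c) = true) :
    cs.all (fun c => row.contains (PySem.Chars.lowerChar c)) =
      cs.all (fun c => pvRow c == k) := by
  rw [Bool.eq_iff_iff, List.all_eq_true, List.all_eq_true]
  rw [List.all_eq_true] at hcs
  constructor <;> intro h x hx
  · rw [← hrow x (hcs x hx)]; exact h x hx
  · rw [hrow x (hcs x hx)]; exact h x hx

-- the whole equivalence at the level of character lists
lemma main_list (l : List Char) (hpre : l.all (fun c => pvLetters.contains c) = true) :
    sameRowLoop sameRowDict 0 l =
      ["qwertyuiop", "asdfghjkl", "zxcvbnm"].any (fun row =>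
        l.all (fun c => row.toList.contains (PySem.Chars.lowerChar c))) := by
  cases l with
  | nil => rfl
  | cons c cs =>
    simp only [List.all_cons, Bool.and_eq_true] at hpre
    obtain ⟨hc, hcs⟩ := hpre
    obtain ⟨t1, t2, t3, hmem, -⟩ := tab_of_letter c hc
    have h1 : ∀ x, pvLetters.contains x = true →
        "qwertyuiop".toList.contains (PySem.Chars.lowerChar x) = (pvRow x == 1) :=
      fun x hx => (tab_of_letter x hx).1
    have h2 : ∀ x, pvLetters.contains x = true →
        "asdfghjkl".toList.contains (PySem.Chars.lowerChar x) = (pvRow x == 2) :=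
      fun x hx => (tab_of_letter x hx).2.1
    have h3 : ∀ x, pvLetters.contains x = true →
        "zxcvbnm".toList.contains (PySem.Chars.lowerChar x) = (pvRow x == 3) :=
      fun x hx => (tab_of_letter x hx).2.2.1
    have hr0 : pvRow c ≠ 0 := by rcases hmem with h | h | h <;> simp [h]
    rw [loop_step, loop_of_ne _ hr0]
    simp only [List.any_cons, List.any_nil, List.all_cons, Bool.or_false]
    rw [t1, t2, t3,
        all_row_congr 1 _ h1 cs hcs, all_row_congr 2 _ h2 cs hcs, all_row_congr 3 _ h3 cs hcs]
    rcases hmem with h | h | h <;> simp [h]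

-- when two letters of the word sit in different rows, B fails every row test
lemma alt_false_of_mismatch (l : List Char) (a b : Char) (ha : a ∈ l) (hb : b ∈ l)
    (hla : pvLetters.contains a = true) (hlb : pvLetters.contains b = true)
    (hne : pvRow a ≠ pvRow b) :
    (["qwertyuiop", "asdfghjkl", "zxcvbnm"].any (fun row =>
      l.all (fun c => row.toList.contains (PySem.Chars.lowerChar c)))) = false := by
  obtain ⟨a1, a2, a3, -, -⟩ := tab_of_letter a hla
  obtain ⟨b1, b2, b3, -, -⟩ := tab_of_letter b hlb
  simp only [List.any_cons, List.any_nil, Bool.or_false, Bool.or_eq_false_iff]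
  refine ⟨?_, ?_, ?_⟩ <;> rw [List.all_eq_false]
  · by_cases h : pvRow a = 1
    · exact ⟨b, hb, by rw [b1]; simp only [beq_iff_eq]; exact fun e => hne (h.trans e.symm)⟩
    · exact ⟨a, ha, by rw [a1]; simp only [beq_iff_eq]; exact h⟩
  · by_cases h : pvRow a = 2
    · exact ⟨b, hb, by rw [b2]; simp only [beq_iff_eq]; exact fun e => hne (h.trans e.symm)⟩
    · exact ⟨a, ha, by rw [a2]; simp only [beq_iff_eq]; exact h⟩
  · by_cases h : pvRow a = 3
    · exact ⟨b, hb, by rw [b3]; simp only [beq_iff_eq]; exact fun e => hne (h.trans e.symm)⟩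
    · exact ⟨a, ha, by rw [a3]; simp only [beq_iff_eq]; exact h⟩

-- when two letters of the word's letter prefix sit in different rows, A returns False
lemma loop_false_of_mismatch (l : List Char)
    (hmis : (l.takeWhile (fun c => pvLetters.contains c)).all
      (fun c => pvRowOf c ==
        pvRowOf ((l.takeWhile (fun c => pvLetters.contains c)).headD 'a')) = false) :
    ∃ a b, a ∈ l ∧ b ∈ l ∧ pvLetters.contains a = true ∧ pvLetters.contains b = true ∧
      pvRow a ≠ pvRow b ∧ sameRowLoop sameRowDict 0 l = false := by
  rw [List.all_eq_false] at hmis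
  obtain ⟨b, hbp, hbne⟩ := hmis
  have hp : l.takeWhile (fun c => pvLetters.contains c) ≠ [] := by
    intro h; rw [h] at hbp; exact absurd hbp (List.not_mem_nil)
  obtain ⟨h, t, hl⟩ := List.exists_cons_of_ne_nil (l := l) (by
    intro h0; rw [h0] at hp; exact hp rfl)
  have hh : pvLetters.contains h = true := by
    by_contra hc
    rw [hl, List.takeWhile_cons_of_neg (by simpa using hc)] at hp
    exact hp rfl
  have hpre : l.takeWhile (fun c => pvLetters.contains c) =
      h :: t.takeWhile (fun c => pvLetters.contains c) := by
    rw [hl, List.takeWhile_cons_of_pos (by simpa using hh)]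
  rw [hpre] at hbp hbne
  simp only [List.headD_cons] at hbne
  have hbl : pvLetters.contains b = true := by
    rcases List.mem_cons.mp hbp with rfl | hbt
    · exact hh
    · simpa using List.mem_takeWhile_imp hbt
  have hbrow : pvRow b ≠ pvRow h := by
    have eb := (tab_of_letter b hbl).2.2.2.2
    have eh := (tab_of_letter h hh).2.2.2.2
    intro he
    have heq : pvRowOf b = pvRowOf h := by rw [eb, eh, he]
    exact (by simpa using hbne : pvRowOf b ≠ pvRowOf h) heq
  have hbt : b ∈ t := by
    rcases List.mem_cons.mp hbp with rfl | hbt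
    · exact absurd rfl hbrow
    · exact (List.takeWhile_sublist _).mem hbt
  have hr0 : pvRow h ≠ 0 := by
    rcases (tab_of_letter h hh).2.2.2.1 with e | e | e <;> simp [e]
  refine ⟨b, h, hl ▸ List.mem_cons_of_mem _ hbt, hl ▸ List.mem_cons_self, hbl, hh, hbrow, ?_⟩
  rw [hl, loop_step, loop_of_ne _ hr0, List.all_eq_false]
  exact ⟨b, hbt, by simpa using hbrow⟩

-- ===== VERDICT (by name: the statement is the Claim_ definition above) =====
theorem sameRow_spec : Claim_equal_sameRow := by
  intro word _ hpre
  show sameRow word = sameRow_alt word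
  unfold sameRow sameRow_alt
  rcases hpre with hall | hmis
  · exact main_list word.toList hall
  · obtain ⟨a, b, ha, hb, hla, hlb, hne, hA⟩ := loop_false_of_mismatch word.toList hmis
    rw [hA, alt_false_of_mismatch word.toList a b ha hb hla hlb hne]
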